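-- pv_equiv track=rewrite | github.com/etpistezmots/AppliThese | AllApps/PreTraitement/Persee/AmeliorText/OrgaScript/TraitAFct/TrAResumeFct.py | resultagreg
-- ===== SOURCE A (Python) =====
-- def resultagreg(listinit,listindexfalse):
--     NewIntervalleEfface = []
--     if len(listindexfalse) == 0:
--         NewIntervalleEfface.append((listinit[0][0], listinit[-1][1]))
--     else:
--         indexprec = 0
--         for i, indexf in enumerate(listindexfalse):
--             if i == 0:
--                 NewIntervalleEfface.append((listinit[0][0], listinit[indexf][1]))
--             else:
--                 NewIntervalleEfface.append((listinit[indexprec + 1][0], listinit[indexf][1]))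
--             indexprec = indexf
--         NewIntervalleEfface.append((listinit[indexprec + 1][0], listinit[-1][1]))
--     return NewIntervalleEfface
-- ===== SOURCE B (Python) =====
-- def resultagreg(listinit, listindexfalse):
--     def segments(start, falses):
--         if not falses:
--             return [(listinit[start][0], listinit[-1][1])]
--         f = falses[0]
--         return [(listinit[start][0], listinit[f][1])] + segments(f + 1, falses[1:])
--     return segments(0, listindexfalse)
-- ===== Notes on version B (the rewrite author's own statement) =====
-- stated objective: simpler
-- what changed: Replaced A's imperative enumerate loop with its special-cased first iteration, running indexprec pointer and trailing post-loop append by a single structural recursion segments(start, falses) that emits one interval per call and whose base case is the final interval, so the empty/nonempty branch and the i==0 branch both disappear.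
import Mathlib
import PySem

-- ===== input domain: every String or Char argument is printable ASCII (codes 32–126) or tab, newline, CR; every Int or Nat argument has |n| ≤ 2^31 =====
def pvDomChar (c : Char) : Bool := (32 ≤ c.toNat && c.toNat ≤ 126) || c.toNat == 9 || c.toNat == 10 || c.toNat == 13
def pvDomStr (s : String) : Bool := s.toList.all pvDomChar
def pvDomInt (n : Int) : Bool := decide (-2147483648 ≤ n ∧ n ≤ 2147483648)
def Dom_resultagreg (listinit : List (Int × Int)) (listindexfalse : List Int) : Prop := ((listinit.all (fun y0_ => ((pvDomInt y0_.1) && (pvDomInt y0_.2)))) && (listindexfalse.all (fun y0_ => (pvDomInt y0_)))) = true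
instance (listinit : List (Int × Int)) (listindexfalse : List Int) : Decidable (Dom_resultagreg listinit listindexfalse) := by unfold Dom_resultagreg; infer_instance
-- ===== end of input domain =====

-- B replaces A's stateful loop (special-cased first iteration + trailing append) by a
-- structural recursion carrying the segment start; equal return values on Pre_ (no mutation).

-- ===== PORT A =====
-- total Python indexing helper: listinit[i] with default (Pre_ guarantees it is exact)
def pvGet (l : List (Int × Int)) (i : Int) : Int × Int := (PySem.List.pyGet? l i).getD (0, 0)

-- the 'for i, indexf in enumerate(listindexfalse)' loop, state = (NewIntervalleEfface, indexprec)
def resultagregLoop (listinit : List (Int × Int)) : List (Int × Int) → List (Int × Int) × Int → List (Int × Int) × Int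
  | [], st => st
  | (i, indexf) :: rest, (acc, indexprec) =>
      resultagregLoop listinit rest
        (acc ++ [if i == 0 then ((pvGet listinit 0).1, (pvGet listinit indexf).2)
                 else ((pvGet listinit (indexprec + 1)).1, (pvGet listinit indexf).2)], indexf)

def resultagreg (listinit : List (Int × Int)) (listindexfalse : List Int) : List (Int × Int) :=
  if listindexfalse.length == 0 then
    [((pvGet listinit 0).1, (pvGet listinit (-1)).2)]
  else
    let st := resultagregLoop listinit (PySem.List.enumerate listindexfalse 0) ([], 0)
    st.1 ++ [((pvGet listinit (st.2 + 1)).1, (pvGet listinit (-1)).2)]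

-- ===== PORT B =====
-- segments(start, falses) from Source B: one interval per recursive call, base case = final interval
def pvSegments (listinit : List (Int × Int)) : Int → List Int → List (Int × Int)
  | start, [] => [((pvGet listinit start).1, (pvGet listinit (-1)).2)]
  | start, f :: rest =>
      [((pvGet listinit start).1, (pvGet listinit f).2)] ++ pvSegments listinit (f + 1) rest

def resultagreg_alt (listinit : List (Int × Int)) (listindexfalse : List Int) : List (Int × Int) :=
  pvSegments listinit 0 listindexfalse

-- ===== PRECONDITION & SPEC =====
-- Pre_ excludes exactly the inputs where Python A raises IndexError: an empty listinit, or an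
-- index f in listindexfalse for which listinit[f] or listinit[f+1] is out of range.
def Pre_resultagreg (listinit : List (Int × Int)) (listindexfalse : List Int) : Prop :=
  listinit ≠ [] ∧ ∀ f ∈ listindexfalse,
    PySem.Raise.InRange listinit.length f ∧ PySem.Raise.InRange listinit.length (f + 1)
instance (listinit : List (Int × Int)) (listindexfalse : List Int) : Decidable (Pre_resultagreg listinit listindexfalse) := by unfold Pre_resultagreg; infer_instance
def pvWitness_resultagreg : (List (Int × Int)) × List Int := ([(1, 2), (3, 4), (5, 6)], [0, 1])

def Spec_resultagreg (listinit : List (Int × Int)) (listindexfalse : List Int) (out : List (Int × Int)) : Prop := out = resultagreg_alt listinit listindexfalse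
instance (listinit : List (Int × Int)) (listindexfalse : List Int) (out : List (Int × Int)) : Decidable (Spec_resultagreg listinit listindexfalse out) := by unfold Spec_resultagreg; infer_instance

-- ===== CLAIM (what is proved, stated in full; the proofs are below) =====
def Claim_equal_resultagreg : Prop := ∀ (listinit : List (Int × Int)) (listindexfalse : List Int), Dom_resultagreg listinit listindexfalse → Pre_resultagreg listinit listindexfalse → Spec_resultagreg listinit listindexfalse (resultagreg listinit listindexfalse)

-- ===== LEMMAS AND PROOFS =====
-- A's loop from the second iteration on equals B's recursion started at prev + 1
theorem loop_spec (l : List (Int × Int)) :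
    ∀ (rest : List Int) (s prev : Int) (acc : List (Int × Int)), 1 ≤ s →
      (let r := resultagregLoop l (PySem.List.enumerate rest s) (acc, prev)
       r.1 ++ [((pvGet l (r.2 + 1)).1, (pvGet l (-1)).2)])
      = acc ++ pvSegments l (prev + 1) rest := by
  intro rest
  induction rest with
  | nil =>
    intro s prev acc _
    simp [PySem.List.enumerate_nil, resultagregLoop, pvSegments]
  | cons f rs ih =>
    intro s prev acc hs
    have hs0 : (s == 0) = false := beq_eq_false_iff_ne.mpr (by omega)
    simp only [PySem.List.enumerate_cons, resultagregLoop, hs0, Bool.false_eq_true, if_false]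
    rw [ih (s + 1) f (acc ++ [((pvGet l (prev + 1)).1, (pvGet l f).2)]) (by omega)]
    simp [pvSegments, List.append_assoc]

-- ===== VERDICT (by name: the statement is the Claim_ definition above) =====
theorem resultagreg_spec : Claim_equal_resultagreg := by
  intro listinit listindexfalse _ _
  unfold Spec_resultagreg resultagreg resultagreg_alt
  cases listindexfalse with
  | nil => simp [pvSegments]
  | cons f rs =>
    have hlen : ((f :: rs).length == 0) = false := by simp
    simp only [hlen, PySem.List.enumerate_cons, resultagregLoop,
      beq_self_eq_true, if_true, Bool.false_eq_true, if_false, List.nil_append]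
    rw [loop_spec listinit rs (0 + 1) f
      [((pvGet listinit 0).1, (pvGet listinit f).2)] (by omega)]
    simp [pvSegments]
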